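-- pv_equiv track=rewrite | github.com/AragornBFRer/MDCP | wilds/poverty/analysis/plot.py | _baseline_entry_candidates
-- ===== SOURCE A (Python) =====
-- from typing import Dict, Iterable, List, Mapping, Optional, Sequence, Tuple
--
-- def _baseline_entry_candidates(baseline_results: Mapping[str, object]) -> List[str]:
--     priority = [
--         "Max_Aggregated",
--     ]
--     ordered: List[str] = []
--     for name in priority:
--         if name in baseline_results:
--             ordered.append(name)
--     for name in baseline_results.keys():
--         if name not in ordered:
--             ordered.append(str(name))
--     return ordered
-- ===== SOURCE B (Python) =====
-- def _baseline_entry_candidates(baseline_results):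
--     # One stable sort: the priority key 'Max_Aggregated' (key False) sorts to the
--     # front when present; all other keys keep their insertion order.
--     return [str(k) for k in sorted(baseline_results, key=lambda k: k != "Max_Aggregated")]
-- ===== Notes on version B (the rewrite author's own statement) =====
-- stated objective: faster
-- what changed: Replaces the two explicit build passes (priority scan plus a membership-checked append loop over the growing output) with a single stable sort keyed on k != 'Max_Aggregated', relying on sort stability to keep non-priority keys in insertion order.
import Mathlib
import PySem

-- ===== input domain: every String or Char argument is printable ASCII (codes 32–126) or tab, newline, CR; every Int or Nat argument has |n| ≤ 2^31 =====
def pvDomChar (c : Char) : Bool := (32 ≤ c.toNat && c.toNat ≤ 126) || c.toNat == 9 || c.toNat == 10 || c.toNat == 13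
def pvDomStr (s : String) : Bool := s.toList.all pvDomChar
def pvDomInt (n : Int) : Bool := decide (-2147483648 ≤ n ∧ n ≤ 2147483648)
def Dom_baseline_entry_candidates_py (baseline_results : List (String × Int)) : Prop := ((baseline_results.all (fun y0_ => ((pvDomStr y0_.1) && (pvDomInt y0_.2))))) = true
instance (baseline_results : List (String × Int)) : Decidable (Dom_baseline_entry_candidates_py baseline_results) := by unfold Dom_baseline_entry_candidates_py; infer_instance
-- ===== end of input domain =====

-- B replaces A's two build passes by one stable sort keyed on k != "Max_Aggregated" (idiomatic one-liner).


-- ===== PORT A =====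
-- dict keys in insertion order (duplicate keys in the assoc list collapse as dict() would)
def baseline_entry_candidates_py (baseline_results : List (String × Int)) : List String :=
  let keys := PySem.List.dedup (baseline_results.map Prod.fst)
  let priority : List String := ["Max_Aggregated"]
  let ordered : List String :=
    priority.foldl (fun ordered name => if name ∈ keys then ordered ++ [name] else ordered) []
  keys.foldl (fun ordered name => if name ∈ ordered then ordered else ordered ++ [name]) ordered

-- ===== PORT B =====
def baseline_entry_candidates_py_alt (baseline_results : List (String × Int)) : List String :=
  let keys := PySem.List.dedup (baseline_results.map Prod.fst)
  -- [str(k) for k in sorted(keys, key=lambda k: k != 'Max_Aggregated')]; str(k) = k on strings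
  (PySem.List.sorted keys (fun k => k != "Max_Aggregated") false).map (fun k => k)

-- ===== PRECONDITION & SPEC =====
def Spec_baseline_entry_candidates_py (baseline_results : List (String × Int)) (out : List String) : Prop := out = baseline_entry_candidates_py_alt baseline_results
instance (baseline_results : List (String × Int)) (out : List String) : Decidable (Spec_baseline_entry_candidates_py baseline_results out) := by unfold Spec_baseline_entry_candidates_py; infer_instance

-- ===== CLAIM (what is proved, stated in full; the proofs are below) =====
def Claim_equal_baseline_entry_candidates_py : Prop := ∀ (baseline_results : List (String × Int)), Dom_baseline_entry_candidates_py baseline_results → Spec_baseline_entry_candidates_py baseline_results (baseline_entry_candidates_py baseline_results)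

-- ===== LEMMAS AND PROOFS =====

-- A's second loop over a Nodup list appends exactly the elements not already in the accumulator.
theorem pv_foldl_dedup_append (l : List String) (acc : List String) (hnd : l.Nodup) :
    l.foldl (fun ordered name => if name ∈ ordered then ordered else ordered ++ [name]) acc
      = acc ++ l.filter (fun x => !decide (x ∈ acc)) := by
  induction l generalizing acc with
  | nil => simp
  | cons x t ih =>
    rcases List.nodup_cons.mp hnd with ⟨hx, ht⟩
    by_cases hmem : x ∈ acc
    · simp only [List.foldl_cons, if_pos hmem, ih acc ht, List.filter_cons]
      simp [hmem]
    · simp only [List.foldl_cons, if_neg hmem, ih (acc ++ [x]) ht, List.filter_cons]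
      have hcg : t.filter (fun y => !decide (y ∈ acc ++ [x])) = t.filter (fun y => !decide (y ∈ acc)) := by
        apply List.filter_congr
        intro y hy
        have hyx : y ≠ x := fun h => hx (h ▸ hy)
        simp [List.mem_append, hyx]
      rw [hcg]
      simp [hmem]

-- insertBy with a false-key element goes after the false block and before the true block.
theorem pv_insertBy_partition (key : String → Bool) (x : String) (F T : List String)
    (hF : ∀ y ∈ F, key y = false) (hT : ∀ y ∈ T, key y = true) (hx : key x = false) :
    PySem.List.insertBy (fun a b => decide (key a < key b)) x (F ++ T) = F ++ x :: T := by
  induction F with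
  | nil =>
    cases T with
    | nil => simp [PySem.List.insertBy]
    | cons t ts =>
      have h1 : key t = true := hT t (by simp)
      simp [PySem.List.insertBy, hx, h1]
  | cons f fs ih =>
    have hkf : key f = false := hF f (by simp)
    have hlt : ¬ (key x < key f) := by simp [hx, hkf]
    simp only [List.cons_append, PySem.List.insertBy]
    rw [if_neg (by simp [hlt])]
    have hF' : ∀ y ∈ fs, key y = false := fun y hy => hF y (by simp [hy])
    simp [ih hF']

-- the insertion-sort fold keeps the accumulator partitioned: falses in order, then trues in order.
theorem pv_foldl_insertBy_partition (key : String → Bool) (l F T : List String)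
    (hF : ∀ y ∈ F, key y = false) (hT : ∀ y ∈ T, key y = true) :
    l.foldl (fun acc x => PySem.List.insertBy (fun a b => decide (key a < key b)) x acc) (F ++ T)
      = (F ++ l.filter (fun x => key x = false)) ++ (T ++ l.filter (fun x => key x = true)) := by
  induction l generalizing F T with
  | nil => simp
  | cons x t ih =>
    simp only [List.foldl_cons]
    by_cases hx : key x = false
    · rw [pv_insertBy_partition key x F T hF hT hx]
      have hF' : ∀ y ∈ F ++ [x], key y = false := by
        intro y hy
        rcases List.mem_append.mp hy with h | h
        · exact hF y h
        · rw [List.mem_singleton.mp h]; exact hx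
      have hstep : F ++ x :: T = (F ++ [x]) ++ T := by simp
      rw [hstep, ih (F ++ [x]) T hF' hT]
      simp [hx]
    · have hxt : key x = true := by revert hx; cases key x <;> simp
      have hins : PySem.List.insertBy (fun a b => decide (key a < key b)) x (F ++ T)
          = (F ++ T) ++ [x] := by
        apply PySem.List.insertBy_of_forall_not_before
        intro y hy
        rcases List.mem_append.mp hy with h | h
        · simp [hxt, hF y h]
        · simp [hxt, hT y h]
      have hT' : ∀ y ∈ T ++ [x], key y = true := by
        intro y hy
        rcases List.mem_append.mp hy with h | h
        · exact hT y h
        · rw [List.mem_singleton.mp h]; exact hxt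
      rw [hins, show (F ++ T) ++ [x] = F ++ (T ++ [x]) by simp, ih F (T ++ [x]) hF hT']
      simp [hxt]

-- B's sort is the stable partition: the "Max_Aggregated" occurrences first, everything else in order.
theorem pv_sorted_partition (keys : List String) :
    PySem.List.sorted keys (fun k => k != "Max_Aggregated") false
      = keys.filter (fun x => (x != "Max_Aggregated") = false)
        ++ keys.filter (fun x => (x != "Max_Aggregated") = true) := by
  rw [PySem.List.sorted_eq_foldl_insertBy]
  have h := pv_foldl_insertBy_partition (fun k => k != "Max_Aggregated") keys [] []
    (by simp) (by simp)
  simpa using h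

theorem baseline_entry_candidates_py_eq (baseline_results : List (String × Int)) :
    baseline_entry_candidates_py baseline_results = baseline_entry_candidates_py_alt baseline_results := by
  unfold baseline_entry_candidates_py baseline_entry_candidates_py_alt
  set keys := PySem.List.dedup (baseline_results.map Prod.fst) with hkeys
  have hnd : keys.Nodup := PySem.List.nodup_dedup _
  simp only [List.foldl_cons, List.foldl_nil, List.nil_append, List.map_id_fun', id_eq]
  rw [pv_sorted_partition keys]
  by_cases hmem : ("Max_Aggregated" : String) ∈ keys
  · rw [if_pos hmem, pv_foldl_dedup_append keys _ hnd]
    have h1 : keys.filter (fun x => decide ((x != "Max_Aggregated") = false)) = ["Max_Aggregated"] := by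
      have hcg : keys.filter (fun x => decide ((x != "Max_Aggregated") = false))
           = keys.filter (· == "Max_Aggregated") := by
        apply List.filter_congr
        intro y _
        cases h : (y == ("Max_Aggregated" : String)) <;> simp_all [bne]
      rw [hcg, List.filter_beq]
      rw [List.count_eq_one_of_mem hnd hmem]
      rfl
    have h2 : keys.filter (fun x => !decide (x ∈ (["Max_Aggregated"] : List String)))
            = keys.filter (fun x => decide ((x != "Max_Aggregated") = true)) := by
      apply List.filter_congr
      intro y _
      cases h : (y == ("Max_Aggregated" : String)) <;> simp_all [bne]
    rw [h2, h1]
  · rw [if_neg hmem, pv_foldl_dedup_append keys _ hnd]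
    have h1 : keys.filter (fun x => decide ((x != "Max_Aggregated") = false)) = [] := by
      rw [List.filter_eq_nil_iff]
      intro y hy
      have : y ≠ "Max_Aggregated" := fun h => hmem (h ▸ hy)
      simp [bne, this]
    have h2 : keys.filter (fun x => decide ((x != "Max_Aggregated") = true)) = keys := by
      rw [List.filter_eq_self]
      intro y hy
      have : y ≠ "Max_Aggregated" := fun h => hmem (h ▸ hy)
      simp [bne, this]
    have h3 : keys.filter (fun x => !decide (x ∈ ([] : List String))) = keys := by
      rw [List.filter_eq_self]; intro y _; simp
    rw [h1, h2, h3]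

-- ===== VERDICT (by name: the statement is the Claim_ definition above) =====
theorem baseline_entry_candidates_py_spec : Claim_equal_baseline_entry_candidates_py := by
  intro baseline_results _
  unfold Spec_baseline_entry_candidates_py
  exact baseline_entry_candidates_py_eq baseline_results
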